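-- pv_equiv track=rewrite | github.com/Merrycupofcoffee/virustotal-scanner | virustotal_lookup.py | detect_input_type
-- ===== SOURCE A (Python) =====
-- def detect_input_type(value):
--
--     hex_chars = "0123456789abcdefABCDEF"  # Defining characters that are valid for hashes
--
--     if len(value) == 32 and all(c in hex_chars for c in value):
--         return "hash"  # MD5(32 characters)
--
--     elif len(value) == 40 and all(c in hex_chars for c in value):
--         return "hash"  # SHA1 (40 characters)
--
--     elif len(value) == 64 and all(c in hex_chars for c in value):
--         return "hash"  # SHA256 (64 characters)
--
--     elif "." in value and all(c.isdigit() or c == '.' for c in value):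
--         return "ip" # IP address check
--
--     elif value.startswith("http://") or value.startswith("https://"):
--         return "url" # URL check
--
--     else:
--         return "unknown"
-- ===== SOURCE B (Python) =====
-- def detect_input_type(value):
--     hex_chars = "0123456789abcdefABCDEF"
--     all_hex = True
--     has_dot = False
--     all_ipchar = True
--     for c in value:
--         if c not in hex_chars:
--             all_hex = False
--         if c == '.':
--             has_dot = True
--         elif not c.isdigit():
--             all_ipchar = False
--     if all_hex and len(value) in (32, 40, 64):
--         return "hash"
--     if has_dot and all_ipchar:
--         return "ip"
--     if value.startswith(("http://", "https://")):
--         return "url"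
--     return "unknown"
-- ===== Notes on version B (the rewrite author's own statement) =====
-- stated objective: alternative
-- what changed: Replaces A's up-to-four separate full scans of the string (three all-hex scans plus the digit-or-dot scan and substring search) with a single pass that accumulates three flags (all-hex, has-dot, all-digit-or-dot) and then branches once; same O(n) cost, one traversal instead of several.
import Mathlib
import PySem

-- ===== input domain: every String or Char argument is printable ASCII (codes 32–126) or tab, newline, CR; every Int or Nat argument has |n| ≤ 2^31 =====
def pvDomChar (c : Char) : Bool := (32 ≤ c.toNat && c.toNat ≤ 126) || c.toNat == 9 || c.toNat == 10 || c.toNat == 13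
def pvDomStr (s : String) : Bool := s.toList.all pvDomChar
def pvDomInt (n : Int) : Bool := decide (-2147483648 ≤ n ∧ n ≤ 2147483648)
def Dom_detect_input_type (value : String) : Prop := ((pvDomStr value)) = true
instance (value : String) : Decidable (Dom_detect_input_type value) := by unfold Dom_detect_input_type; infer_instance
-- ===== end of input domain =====

-- B folds the string once into three flags (all-hex, has-dot, all-digit-or-dot) and branches once,
-- instead of A's up-to-four separate scans (alternative decomposition; same O(n) cost, identical return values).


-- ===== PORT A =====
def detect_input_type (value : String) : String :=
  let hex_chars := "0123456789abcdefABCDEF".toList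
  if value.toList.length == 32 && value.toList.all (fun c => hex_chars.contains c) then "hash"
  else if value.toList.length == 40 && value.toList.all (fun c => hex_chars.contains c) then "hash"
  else if value.toList.length == 64 && value.toList.all (fun c => hex_chars.contains c) then "hash"
  else if PySem.Str.isIn "." value && value.toList.all (fun c => PySem.Chars.isdigit c || c == '.') then "ip"
  else if PySem.Chars.startswith value.toList "http://".toList || PySem.Chars.startswith value.toList "https://".toList then "url"
  else "unknown"

-- ===== PORT B =====
-- one step of B's single loop: updates (all_hex, has_dot, all_ipchar)
def pvStep (st : Bool × Bool × Bool) (c : Char) : Bool × Bool × Bool :=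
  (st.1 && "0123456789abcdefABCDEF".toList.contains c,
   st.2.1 || c == '.',
   if c == '.' then st.2.2 else st.2.2 && PySem.Chars.isdigit c)

def detect_input_type_alt (value : String) : String :=
  let st := value.toList.foldl pvStep (true, false, true)
  if st.1 && (value.toList.length == 32 || value.toList.length == 40 || value.toList.length == 64) then "hash"
  else if st.2.1 && st.2.2 then "ip"
  else if PySem.Chars.startswith value.toList "http://".toList || PySem.Chars.startswith value.toList "https://".toList then "url"
  else "unknown"

-- ===== PRECONDITION & SPEC =====
def Spec_detect_input_type (value : String) (out : String) : Prop := out = detect_input_type_alt value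
instance (value : String) (out : String) : Decidable (Spec_detect_input_type value out) := by unfold Spec_detect_input_type; infer_instance

-- ===== CLAIM (what is proved, stated in full; the proofs are below) =====
def Claim_equal_detect_input_type : Prop := ∀ (value : String), Dom_detect_input_type value → Spec_detect_input_type value (detect_input_type value)

-- ===== LEMMAS AND PROOFS =====

lemma pvStep_foldl (cs : List Char) (a h i : Bool) :
    cs.foldl pvStep (a, h, i) =
      (a && cs.all (fun c => "0123456789abcdefABCDEF".toList.contains c),
       h || cs.any (fun c => c == '.'),
       i && cs.all (fun c => c == '.' || PySem.Chars.isdigit c)) := by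
  induction cs generalizing a h i with
  | nil => simp
  | cons c cs ih =>
    cases hc : (c == '.') <;>
      simp [pvStep, ih, hc, Bool.and_assoc]

lemma isIn_dot (cs : List Char) :
    PySem.Chars.isIn ['.'] cs = cs.any (fun c => c == '.') := by
  rw [Bool.eq_iff_iff, PySem.Chars.isIn_iff_infix, List.singleton_infix_iff]
  simp

lemma all_dot_digit (cs : List Char) :
    cs.all (fun c => PySem.Chars.isdigit c || c == '.') =
      cs.all (fun c => c == '.' || PySem.Chars.isdigit c) := by
  induction cs with
  | nil => rfl
  | cons c cs ih => simp [Bool.or_comm]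

-- ===== VERDICT (by name: the statement is the Claim_ definition above) =====
theorem detect_input_type_spec : Claim_equal_detect_input_type := by
  intro value _
  unfold Spec_detect_input_type detect_input_type detect_input_type_alt
  simp only [pvStep_foldl, Bool.true_and, Bool.false_or, PySem.Str.isIn_eq,
    show ".".toList = ['.'] from rfl, isIn_dot, all_dot_digit]
  by_cases hH : (value.toList.all (fun c => "0123456789abcdefABCDEF".toList.contains c) = true) <;>
    by_cases h32 : (value.toList.length == 32) = true <;>
    by_cases h40 : (value.toList.length == 40) = true <;>
    by_cases h64 : (value.toList.length == 64) = true <;>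
    simp_all
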